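-- pv_equiv track=rewrite | github.com/Nero007x/fullstack-interview-preparation | 0781-basic-calculator-iv/0781-basic-calculator-iv.py | basicCalculatorIV
-- ===== SOURCE A (Python) =====
-- from typing import List
--
-- def basicCalculatorIV(expression: str, evalvars: List[str], evalints: List[int]) -> List[str]:
--     import collections
--
--     evalmap = dict(zip(evalvars, evalints))
--
--     def parse(expr):
--         def to_tokens(s):
--             return s.replace("(", " ( ").replace(")", " ) ").split()
--
--         def combine(p1, p2):
--             res = collections.Counter()
--             for vars1, coeff1 in p1.items():
--                 for vars2, coeff2 in p2.items():
--                     new_vars = tuple(sorted(vars1 + vars2))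
--                     res[new_vars] += coeff1 * coeff2
--             return res
--
--         def add(p1, p2):
--             res = collections.Counter(p1)
--             for k, v in p2.items():
--                 res[k] += v
--             return res
--
--         def sub(p1, p2):
--             res = collections.Counter(p1)
--             for k, v in p2.items():
--                 res[k] -= v
--             return res
--
--         def make(val):
--             if isinstance(val, int):
--                 return collections.Counter({(): val})
--             elif val in evalmap:
--                 return collections.Counter({(): evalmap[val]})
--             elif val.isalpha():
--                 return collections.Counter({(val,): 1})
--             else:
--                 return collections.Counter({(): int(val)})
--
--         tokens = to_tokens(expr)
--         stack = []
--         ops = []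
--
--         def reduce():
--             b = stack.pop()
--             a = stack.pop()
--             op = ops.pop()
--             if op == '+':
--                 stack.append(add(a, b))
--             elif op == '-':
--                 stack.append(sub(a, b))
--             elif op == '*':
--                 stack.append(combine(a, b))
--
--         i = 0
--         while i < len(tokens):
--             token = tokens[i]
--             if token == '(':
--                 ops.append(token)
--             elif token == ')':
--                 while ops[-1] != '(':
--                     reduce()
--                 ops.pop()
--             elif token in "+-*":
--                 while ops and ops[-1] != '(' and (ops[-1] == '*' or (token in "+-" and ops[-1] in "+-")):
--                     reduce()
--                 ops.append(token)
--             else: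
--                 stack.append(make(token))
--             i += 1
--
--         while ops:
--             reduce()
--
--         return stack[0]
--
--     poly = parse(expression)
--
--     # Remove 0 coefficient terms
--     poly = {k: v for k, v in poly.items() if v != 0}
--
--     # Sort by degree (descending) then lex order
--     def sort_key(term):
--         return (-len(term[0]), term[0])
--
--     result = []
--     for vars_, coeff in sorted(poly.items(), key=sort_key):
--         if not vars_:
--             result.append(str(coeff))
--         else:
--             result.append(f"{coeff}*" + '*'.join(vars_))
--     return result
-- ===== SOURCE B (Python) =====
-- from typing import List
--
-- def basicCalculatorIV(expression: str, evalvars: List[str], evalints: List[int]) -> List[str]: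
--     import collections
--
--     evalmap = dict(zip(evalvars, evalints))
--
--     def to_tokens(s):
--         return s.replace("(", " ( ").replace(")", " ) ").split()
--
--     def combine(p1, p2):
--         res = collections.Counter()
--         for vars1, coeff1 in p1.items():
--             for vars2, coeff2 in p2.items():
--                 new_vars = tuple(sorted(vars1 + vars2))
--                 res[new_vars] += coeff1 * coeff2
--         return res
--
--     def add(p1, p2):
--         res = collections.Counter(p1)
--         for k, v in p2.items():
--             res[k] += v
--         return res
--
--     def sub(p1, p2):
--         res = collections.Counter(p1)
--         for k, v in p2.items():
--             res[k] -= v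
--         return res
--
--     def make(val):
--         if val in evalmap:
--             return collections.Counter({(): evalmap[val]})
--         elif val.isalpha():
--             return collections.Counter({(val,): 1})
--         else:
--             return collections.Counter({(): int(val)})
--
--     tokens = to_tokens(expression)
--
--     # recursive-descent parser over the token list (grammar: E -> T (('+'|'-') T)*, T -> F ('*' F)*, F -> '(' E ')' | atom)
--     def parse_factor(i):
--         tok = tokens[i]
--         if tok == '(':
--             p, i = parse_expr(i + 1)
--             if i >= len(tokens) or tokens[i] != ')':
--                 raise ValueError("expected ')'")
--             return p, i + 1
--         if tok in ('+', '-', '*', ')'):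
--             raise ValueError("unexpected token " + tok)
--         return make(tok), i + 1
--
--     def parse_term(i):
--         p, i = parse_factor(i)
--         while i < len(tokens) and tokens[i] == '*':
--             q, i = parse_factor(i + 1)
--             p = combine(p, q)
--         return p, i
--
--     def parse_expr(i):
--         p, i = parse_term(i)
--         while i < len(tokens) and tokens[i] in ('+', '-'):
--             op = tokens[i]
--             q, i = parse_term(i + 1)
--             p = add(p, q) if op == '+' else sub(p, q)
--         return p, i
--
--     poly, end = parse_expr(0)
--     if end != len(tokens):
--         raise ValueError("trailing tokens")
--
--     poly = {k: v for k, v in poly.items() if v != 0}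
--
--     def sort_key(term):
--         return (-len(term[0]), term[0])
--
--     result = []
--     for vars_, coeff in sorted(poly.items(), key=sort_key):
--         if not vars_:
--             result.append(str(coeff))
--         else:
--             result.append(f"{coeff}*" + '*'.join(vars_))
--     return result
-- ===== Notes on version B (the rewrite author's own statement) =====
-- stated objective: alternative
-- what changed: Replaces the shunting-yard dual-stack evaluator with a recursive-descent parser (parse_expr/parse_term/parse_factor over the same token stream, left-associative, same precedence), keeping the identical Counter helpers, make() classification and (-degree, lex) output formatting.
-- outside the precondition, e.g. on basicCalculatorIV('1 2', [], []): A returns ['1'], B raises ValueError; on basicCalculatorIV('(1)(2)', [], []): A returns ['1'], B raises ValueError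
import Mathlib
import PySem

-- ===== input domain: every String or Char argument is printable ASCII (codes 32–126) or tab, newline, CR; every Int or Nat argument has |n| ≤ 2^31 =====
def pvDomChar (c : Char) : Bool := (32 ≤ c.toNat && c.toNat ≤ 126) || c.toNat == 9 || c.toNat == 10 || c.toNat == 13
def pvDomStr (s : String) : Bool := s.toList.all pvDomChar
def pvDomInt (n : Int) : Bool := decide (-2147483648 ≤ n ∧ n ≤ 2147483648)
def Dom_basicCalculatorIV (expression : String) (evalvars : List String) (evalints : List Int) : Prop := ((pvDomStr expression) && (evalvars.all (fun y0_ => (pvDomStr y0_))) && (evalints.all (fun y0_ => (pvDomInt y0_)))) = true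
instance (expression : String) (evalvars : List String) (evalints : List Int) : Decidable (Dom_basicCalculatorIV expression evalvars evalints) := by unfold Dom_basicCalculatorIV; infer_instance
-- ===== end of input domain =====

-- B replaces A's shunting-yard dual-stack evaluator by a recursive-descent parser over the
-- same token stream (same precedence/associativity, identical Counter helpers and output
-- formatting); alternative decomposition, same results on every well-formed expression.


-- Shared helpers: both Python versions contain the IDENTICAL code for tokenization,
-- the Counter polynomial operations, make() and the final sort/format pass, so the two
-- ports share these definitions.  A polynomial is a Counter: dict from sorted var-tuples
-- (List String) to Int coefficients.

-- evalmap = dict(zip(evalvars, evalints))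
def pvEvalmap (evalvars : List String) (evalints : List Int) : PySem.Dict String Int :=
  (evalvars.zip evalints).foldl (fun d kv => d.insert kv.1 kv.2) PySem.Dict.empty

-- s.replace("(", " ( ").replace(")", " ) ").split()
def pvTokens (s : String) : List String :=
  PySem.Str.split₀ (PySem.Str.replace (PySem.Str.replace s "(" " ( ") ")" " ) ")

-- def combine(p1, p2): res = Counter(); for each item pair: res[tuple(sorted(v1+v2))] += c1*c2
def pvCombine (p1 p2 : PySem.Dict (List String) Int) : PySem.Dict (List String) Int :=
  p1.items.foldl (fun res kv1 =>
    p2.items.foldl (fun res kv2 =>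
      let nv := PySem.List.sorted (kv1.1 ++ kv2.1) (fun x => x) false
      res.insert nv (res.getD nv 0 + kv1.2 * kv2.2)) res) PySem.Dict.empty

-- def add(p1, p2): res = Counter(p1); for k, v in p2.items(): res[k] += v
def pvAdd (p1 p2 : PySem.Dict (List String) Int) : PySem.Dict (List String) Int :=
  p2.items.foldl (fun res kv => res.insert kv.1 (res.getD kv.1 0 + kv.2)) p1

-- def sub(p1, p2): res = Counter(p1); for k, v in p2.items(): res[k] -= v
def pvSub (p1 p2 : PySem.Dict (List String) Int) : PySem.Dict (List String) Int :=
  p2.items.foldl (fun res kv => res.insert kv.1 (res.getD kv.1 0 - kv.2)) p1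

-- def make(val): evalmap lookup / isalpha variable / int(val).
-- int(val) raising ValueError is the Python exception path (excluded by Pre_): the port
-- uses (ofStr? val).getD 0 there, a value never relied upon inside Pre_.
def pvMake (em : PySem.Dict String Int) (val : String) : PySem.Dict (List String) Int :=
  if em.contains val then PySem.Dict.empty.insert [] (em.getD val 0)
  else if PySem.Str.strIsalpha val then PySem.Dict.empty.insert [val] 1
  else PySem.Dict.empty.insert [] ((PySem.Int.ofStr? val).getD 0)

-- the common tail: drop zero coefficients, sort by (-degree, lex), format
def pvFormat (poly : PySem.Dict (List String) Int) : List String :=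
  let items := poly.items.filter (fun kv => kv.2 != 0)
  let srt := PySem.List.sorted2 items (fun kv => -(kv.1.length : Int)) (fun kv => kv.1) false
  srt.foldl (fun res kv =>
    if kv.1 = [] then res ++ [PySem.Int.toStr kv.2]
    else res ++ [PySem.Int.toStr kv.2 ++ "*" ++ PySem.Str.join "*" kv.1]) []

-- ===== PORT A =====  (shunting yard: value stack + operator stack, head = top)

-- one reduce(): pop b, a and op, push op(a,b).  Pops on an empty/short stack raise
-- IndexError in Python (excluded by Pre_); the port leaves the stack unchanged there.
def pvStep (op : String) (stack : List (PySem.Dict (List String) Int)) :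
    List (PySem.Dict (List String) Int) :=
  match stack with
  | b :: a :: s =>
    if op = "+" then pvAdd a b :: s
    else if op = "-" then pvSub a b :: s
    else if op = "*" then pvCombine a b :: s
    else s  -- Python's reduce pushes nothing for any other op token
  | s => s

-- token == ')': while ops[-1] != '(': reduce();  ops.pop().
-- (ops[-1] on an empty list raises IndexError in Python — excluded by Pre_.)
def pvPopUntil (stack : List (PySem.Dict (List String) Int)) (ops : List String) :
    List (PySem.Dict (List String) Int) × List String :=
  match ops with
  | [] => (stack, [])
  | op :: os => if op = "(" then (stack, os) else pvPopUntil (pvStep op stack) os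

-- operator token: while ops and ops[-1] != '(' and (ops[-1]=='*' or (token in "+-" and ops[-1] in "+-")): reduce()
def pvPopWhile (tok : String) (stack : List (PySem.Dict (List String) Int)) (ops : List String) :
    List (PySem.Dict (List String) Int) × List String :=
  match ops with
  | [] => (stack, [])
  | op :: os =>
    if op ≠ "(" ∧ (op = "*" ∨ (PySem.Str.isIn tok "+-" ∧ PySem.Str.isIn op "+-")) then
      pvPopWhile tok (pvStep op stack) os
    else (stack, op :: os)

-- the body of the token loop
def pvShuntStep (em : PySem.Dict String Int)
    (st : List (PySem.Dict (List String) Int) × List String) (token : String) :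
    List (PySem.Dict (List String) Int) × List String :=
  if token = "(" then (st.1, token :: st.2)
  else if token = ")" then pvPopUntil st.1 st.2
  else if PySem.Str.isIn token "+-*" then  -- Python's 'token in "+-*"' is a substring test
    let so := pvPopWhile token st.1 st.2
    (so.1, token :: so.2)
  else (pvMake em token :: st.1, st.2)

-- while ops: reduce()
def pvDrain (stack : List (PySem.Dict (List String) Int)) (ops : List String) :
    List (PySem.Dict (List String) Int) :=
  match ops with
  | [] => stack
  | op :: os => pvDrain (pvStep op stack) os

def basicCalculatorIV (expression : String) (evalvars : List String) (evalints : List Int) : List String :=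
  let em := pvEvalmap evalvars evalints
  let tokens := pvTokens expression
  let st := tokens.foldl (pvShuntStep em) ([], [])
  let stack := pvDrain st.1 st.2
  -- stack[0] (the BOTTOM of the stack, our list is top-first): IndexError when empty (excluded by Pre_)
  pvFormat (stack.getLastD PySem.Dict.empty)

-- ===== PORT B =====  (recursive descent: E -> T (('+'|'-') T)*, T -> F ('*' F)*, F -> '(' E ')' | atom)
-- Python B recurses without fuel; the port threads a fuel counter as its totality device
-- (none = fuel exhausted or a parse error, i.e. a Python exception — excluded by Pre_).

mutual
def pvParseF (em : PySem.Dict String Int) (fuel : Nat) (ts : List String) :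
    Option (PySem.Dict (List String) Int × List String) :=
  match ts with
  | [] => none  -- tokens[i]: IndexError
  | tok :: rest =>
    if tok = "(" then
      match fuel with
      | 0 => none
      | f + 1 =>
        match pvParseE em f rest with
        | some (p, r₁) =>
          match r₁ with
          | ")" :: r => some (p, r)
          | _ => none  -- "expected ')'": ValueError
        | none => none
    else if tok = "+" ∨ tok = "-" ∨ tok = "*" ∨ tok = ")" then none  -- "unexpected token": ValueError
    else some (pvMake em tok, rest)

def pvParseT (em : PySem.Dict String Int) (fuel : Nat) (ts : List String) :
    Option (PySem.Dict (List String) Int × List String) :=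
  match fuel with
  | 0 => none
  | f + 1 =>
    match pvParseF em f ts with
    | some (p, r) => pvParseTLoop em f p r
    | none => none

def pvParseTLoop (em : PySem.Dict String Int) (fuel : Nat)
    (p : PySem.Dict (List String) Int) (r : List String) :
    Option (PySem.Dict (List String) Int × List String) :=
  match r with
  | tok :: rest =>
    if tok = "*" then
      match fuel with
      | 0 => none
      | f + 1 =>
        match pvParseF em f rest with
        | some (q, r₁) => pvParseTLoop em f (pvCombine p q) r₁
        | none => none
    else some (p, tok :: rest)
  | [] => some (p, [])

def pvParseE (em : PySem.Dict String Int) (fuel : Nat) (ts : List String) :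
    Option (PySem.Dict (List String) Int × List String) :=
  match fuel with
  | 0 => none
  | f + 1 =>
    match pvParseT em f ts with
    | some (p, r) => pvParseELoop em f p r
    | none => none

def pvParseELoop (em : PySem.Dict String Int) (fuel : Nat)
    (p : PySem.Dict (List String) Int) (r : List String) :
    Option (PySem.Dict (List String) Int × List String) :=
  match r with
  | tok :: rest =>
    if tok = "+" ∨ tok = "-" then
      match fuel with
      | 0 => none
      | f + 1 =>
        match pvParseT em f rest with
        | some (q, r₁) =>
          pvParseELoop em f (if tok = "+" then pvAdd p q else pvSub p q) r₁
        | none => none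
    else some (p, tok :: rest)
  | [] => some (p, [])
end

def basicCalculatorIV_alt (expression : String) (evalvars : List String) (evalints : List Int) : List String :=
  let em := pvEvalmap evalvars evalints
  let tokens := pvTokens expression
  match pvParseE em (3 * tokens.length + 3) tokens with
  | some (p, r) =>
    if r = [] then pvFormat p
    else []  -- "trailing tokens": Python B raises ValueError (excluded by Pre_)
  | none => []  -- parse error: Python B raises (excluded by Pre_)

-- ===== PRECONDITION & SPEC =====

-- tokens A treats as non-atoms: '(' , ')' and the substrings of "+-*" (A's 'token in "+-*"'
-- is a substring test); "" never occurs in a tokenization but is listed so that atoms are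
-- exactly the tokens whose isIn "+-*" test is false.
def pvIsSpecial (t : String) : Bool :=
  t ∈ (["", "(", ")", "+", "-", "*", "+-", "-*", "+-*"] : List String)

-- DFA over the token list: expect-operand/expect-operator state plus a parenthesis depth;
-- accepts exactly the well-formed infix expressions over atoms, '+', '-', '*' and parens.
def pvChk (expectOperand : Bool) (depth : Nat) : List String → Bool
  | [] => if expectOperand then false else decide (depth = 0)
  | t :: ts =>
    if expectOperand then
      if t = "(" then pvChk true (depth + 1) ts
      else if pvIsSpecial t then false
      else pvChk false depth ts
    else
      if t = "+" ∨ t = "-" ∨ t = "*" then pvChk true depth ts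
      else if t = ")" then decide (0 < depth) && pvChk false (depth - 1) ts
      else false

-- an atom token A's make() accepts without raising: in evalmap, alphabetic, or int()-parseable
def pvAtomOk (em : PySem.Dict String Int) (t : String) : Bool :=
  em.contains t || PySem.Str.strIsalpha t || (PySem.Int.ofStr? t).isSome

-- Pre_ excludes the inputs on which A raises (unbalanced/ill-formed expressions, atoms
-- int() rejects) and the malformed concatenations of several complete expressions, where
-- A's returned value is just the leftover bottom of its value stack (an accident of the
-- implementation) and B raises ValueError instead.
def Pre_basicCalculatorIV (expression : String) (evalvars : List String) (evalints : List Int) : Prop :=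
  (pvChk true 0 (pvTokens expression)
    && (pvTokens expression).all (fun t => pvIsSpecial t || pvAtomOk (pvEvalmap evalvars evalints) t)) = true

instance (expression : String) (evalvars : List String) (evalints : List Int) : Decidable (Pre_basicCalculatorIV expression evalvars evalints) := by
  unfold Pre_basicCalculatorIV; infer_instance

def pvWitness_basicCalculatorIV : String × List String × List Int :=
  ("e + 8 - a + 5", ["e"], [1])

def Spec_basicCalculatorIV (expression : String) (evalvars : List String) (evalints : List Int) (out : List String) : Prop := out = basicCalculatorIV_alt expression evalvars evalints
instance (expression : String) (evalvars : List String) (evalints : List Int) (out : List String) : Decidable (Spec_basicCalculatorIV expression evalvars evalints out) := by unfold Spec_basicCalculatorIV; infer_instance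

-- ===== CLAIM (what is proved, stated in full; the proofs are below) =====
def Claim_equal_basicCalculatorIV : Prop := ∀ (expression : String) (evalvars : List String) (evalints : List Int), Dom_basicCalculatorIV expression evalvars evalints → Pre_basicCalculatorIV expression evalvars evalints → Spec_basicCalculatorIV expression evalvars evalints (basicCalculatorIV expression evalvars evalints)

-- ===== LEMMAS AND PROOFS =====


-- ---- proof-side abbreviations ----

-- the state of A's token loop after a list of tokens
def pvRun (em : PySem.Dict String Int)
    (st : List (PySem.Dict (List String) Int) × List String) (ts : List String) :
    List (PySem.Dict (List String) Int) × List String :=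
  ts.foldl (pvShuntStep em) st

-- every special token of the list is one of the five real delimiters (no "+-"-style fake operators)
def pvGood (ts : List String) : Prop :=
  ∀ t ∈ ts, pvIsSpecial t = true → t = "(" ∨ t = ")" ∨ t = "+" ∨ t = "-" ∨ t = "*"

-- op-stack heads on which pvPopWhile "*" (resp. pvPopWhile "+") stops immediately
def pvNoStar : List String → Prop
  | [] => True
  | x :: _ => x = "(" ∨ x = "+" ∨ x = "-"

def pvNoOp : List String → Prop
  | [] => True
  | x :: _ => x = "("

-- the first remaining token is not "*" (so a term loop really stopped there)
def pvHeadNotStar : List String → Prop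
  | [] => True
  | x :: _ => x ≠ "*"

theorem pvNoOp_noStar {O : List String} (h : pvNoOp O) : pvNoStar O := by
  cases O with
  | nil => trivial
  | cons x xs => exact Or.inl h

theorem pv_isIn_false {t : String} (h : pvIsSpecial t = false) :
    PySem.Str.isIn t "+-*" = false := by
  cases hin : PySem.Str.isIn t "+-*" with
  | false => rfl
  | true =>
    exfalso
    rw [PySem.Str.isIn_iff_infix] at hin
    have h7 : t.toList = [] ∨ t.toList = ['+'] ∨ t.toList = ['-'] ∨ t.toList = ['*'] ∨
        t.toList = ['+','-'] ∨ t.toList = ['-','*'] ∨ t.toList = ['+','-','*'] := by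
      obtain ⟨s, u, hsu⟩ := hin
      rcases s with _|⟨a, _|⟨b, _|⟨c, _|s⟩⟩⟩ <;>
        rcases hl : t.toList with _|⟨x, _|⟨y, _|⟨z, _|l⟩⟩⟩ <;> simp_all
    have spec : ∀ (u : String), t.toList = u.toList → t = u := fun _ hu => String.toList_inj.mp hu
    have ht : pvIsSpecial t = true := by
      rcases h7 with h'|h'|h'|h'|h'|h'|h'
      · rw [spec "" (by rw [h']; decide)]; decide
      · rw [spec "+" (by rw [h']; decide)]; decide
      · rw [spec "-" (by rw [h']; decide)]; decide
      · rw [spec "*" (by rw [h']; decide)]; decide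
      · rw [spec "+-" (by rw [h']; decide)]; decide
      · rw [spec "-*" (by rw [h']; decide)]; decide
      · rw [spec "+-*" (by rw [h']; decide)]; decide
    rw [h] at ht; exact Bool.false_ne_true ht

theorem pvPopWhile_cons_pos (tok op : String) (os : List String)
    (S : List (PySem.Dict (List String) Int))
    (hc : op ≠ "(" ∧ (op = "*" ∨ (PySem.Str.isIn tok "+-" ∧ PySem.Str.isIn op "+-"))) :
    pvPopWhile tok S (op :: os) = pvPopWhile tok (pvStep op S) os := by
  simp only [pvPopWhile]; rw [if_pos hc]

theorem pvPopWhile_cons_neg (tok op : String) (os : List String)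
    (S : List (PySem.Dict (List String) Int))
    (hc : ¬ (op ≠ "(" ∧ (op = "*" ∨ (PySem.Str.isIn tok "+-" ∧ PySem.Str.isIn op "+-")))) :
    pvPopWhile tok S (op :: os) = (S, op :: os) := by
  simp only [pvPopWhile]; rw [if_neg hc]

theorem pvChk_good : ∀ (ts : List String) (b : Bool) (d : Nat), pvChk b d ts = true → pvGood ts := by
  intro ts
  induction ts with
  | nil => intro _ _ _ t ht _; simp at ht
  | cons t ts ih =>
    intro b d h
    have goal2 : (pvIsSpecial t = true → t = "(" ∨ t = ")" ∨ t = "+" ∨ t = "-" ∨ t = "*") →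
        pvGood ts → pvGood (t :: ts) := by
      intro hh htail u hu hs
      rcases List.mem_cons.mp hu with rfl | hu'
      · exact hh hs
      · exact htail u hu' hs
    cases b with
    | true =>
      simp only [pvChk] at h
      by_cases h1 : t = "("
      · rw [if_pos h1] at h
        exact goal2 (fun _ => Or.inl h1) (ih _ _ h)
      · rw [if_neg h1] at h
        by_cases h2 : pvIsSpecial t = true
        · rw [if_pos h2] at h; cases h
        · rw [if_neg h2] at h
          exact goal2 (fun hs => absurd hs h2) (ih _ _ h)
    | false =>
      simp only [pvChk] at h
      by_cases h1 : t = "+" ∨ t = "-" ∨ t = "*"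
      · rw [if_pos h1] at h
        refine goal2 (fun _ => ?_) (ih _ _ h)
        rcases h1 with a | a | a
        · exact Or.inr (Or.inr (Or.inl a))
        · exact Or.inr (Or.inr (Or.inr (Or.inl a)))
        · exact Or.inr (Or.inr (Or.inr (Or.inr a)))
      · rw [if_neg h1] at h
        by_cases h2 : t = ")"
        · rw [if_pos h2] at h
          exact goal2 (fun _ => Or.inr (Or.inl h2)) (ih _ _ (by simpa using h : _ ∧ _).2)
        · rw [if_neg h2] at h; cases h

theorem pvGood_append {xs ys : List String} (h : pvGood (xs ++ ys)) : pvGood xs ∧ pvGood ys := by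
  constructor <;> intro t ht hs
  · exact h t (List.mem_append_left _ ht) hs
  · exact h t (List.mem_append_right _ ht) hs

theorem pvPopWhile_pm (tok : String) (h : tok = "+" ∨ tok = "-") :
    ∀ (O : List String) S, pvPopWhile tok S O = pvPopWhile "+" S O := by
  intro O
  induction O with
  | nil => intro S; simp [pvPopWhile]
  | cons op os ih =>
    intro S
    have e1 : PySem.Str.isIn tok "+-" = true := by rcases h with h | h <;> subst h <;> decide
    have e2 : PySem.Str.isIn "+" "+-" = true := by decide
    simp only [pvPopWhile, e1, e2]
    split_ifs with hc
    · exact ih _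
    · rfl

theorem pvPopStar_noop {O : List String} (h : pvNoStar O) (S : List (PySem.Dict (List String) Int)) :
    pvPopWhile "*" S O = (S, O) := by
  cases O with
  | nil => simp [pvPopWhile]
  | cons op os =>
    apply pvPopWhile_cons_neg
    rintro ⟨h1, h2 | ⟨hi, _⟩⟩
    · rcases h with h | h | h <;> subst h <;> simp_all
    · exact absurd hi (by decide)

theorem pvPopPlus_noop {O : List String} (h : pvNoOp O) (S : List (PySem.Dict (List String) Int)) :
    pvPopWhile "+" S O = (S, O) := by
  cases O with
  | nil => simp [pvPopWhile]
  | cons op os =>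
    apply pvPopWhile_cons_neg
    rintro ⟨h1, _⟩
    exact h1 h

theorem pvPopPlus_popUntil : ∀ (O : List String) S S' O',
    pvPopWhile "+" S O = (S', "(" :: O') → pvPopUntil S O = (S', O') := by
  intro O
  induction O with
  | nil => intro S S' O' h; simp [pvPopWhile] at h
  | cons op os ih =>
    intro S S' O' h
    simp only [pvPopWhile] at h
    split_ifs at h with hc
    · simp only [pvPopUntil]; rw [if_neg hc.1]; exact ih _ _ _ h
    · rw [Prod.mk.injEq] at h
      obtain ⟨rfl, h2⟩ := h
      obtain ⟨rfl, rfl⟩ := List.cons.inj h2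
      simp [pvPopUntil]

theorem pvPopStar_popPlus : ∀ (O : List String) S,
    pvPopWhile "+" S O = pvPopWhile "+" (pvPopWhile "*" S O).1 (pvPopWhile "*" S O).2 := by
  intro O
  induction O with
  | nil => intro S; simp [pvPopWhile]
  | cons op os ih =>
    intro S
    by_cases hstar : op = "*"
    · subst hstar
      rw [pvPopWhile_cons_pos "*" "*" os S (by decide), pvPopWhile_cons_pos "+" "*" os S (by decide)]
      exact ih _
    · have hc : ¬ (op ≠ "(" ∧ (op = "*" ∨ (PySem.Str.isIn "*" "+-" ∧ PySem.Str.isIn op "+-"))) := by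
        rintro ⟨h1, h2 | ⟨hi, _⟩⟩
        · exact hstar h2
        · exact absurd hi (by decide)
      rw [pvPopWhile_cons_neg "*" op os S hc]

theorem pvPopPlus_drain : ∀ (O : List String) S S',
    pvPopWhile "+" S O = (S', []) → pvDrain S O = S' := by
  intro O
  induction O with
  | nil =>
    intro S S' h
    simp only [pvPopWhile, Prod.mk.injEq] at h
    rw [← h.1]; rfl
  | cons op os ih =>
    intro S S' h
    simp only [pvPopWhile] at h
    split_ifs at h with hc
    · simp only [pvDrain]; exact ih _ _ h
    · simp at h

theorem pvRun_nil (em : PySem.Dict String Int) (st) : pvRun em st [] = st := rfl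

theorem pvRun_cons (em : PySem.Dict String Int) (st) (t : String) (ts : List String) :
    pvRun em st (t :: ts) = pvRun em (pvShuntStep em st t) ts := rfl

theorem pvRun_append (em : PySem.Dict String Int) (st) (xs ys : List String) :
    pvRun em st (xs ++ ys) = pvRun em (pvRun em st xs) ys := by
  simp [pvRun, List.foldl_append]

theorem pvShunt_lparen (em : PySem.Dict String Int) (st) :
    pvShuntStep em st "(" = (st.1, "(" :: st.2) := by
  simp [pvShuntStep]

theorem pvShunt_rparen (em : PySem.Dict String Int) (st) :
    pvShuntStep em st ")" = pvPopUntil st.1 st.2 := by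
  simp [pvShuntStep]

theorem pvShunt_op (em : PySem.Dict String Int) (st) (tok : String)
    (h : tok = "+" ∨ tok = "-" ∨ tok = "*") :
    pvShuntStep em st tok = ((pvPopWhile tok st.1 st.2).1, tok :: (pvPopWhile tok st.1 st.2).2) := by
  rcases h with rfl | rfl | rfl <;>
    simp [pvShuntStep,
      show PySem.Chars.isIn ['+'] ['+', '-', '*'] = true from by decide,
      show PySem.Chars.isIn ['-'] ['+', '-', '*'] = true from by decide,
      show PySem.Chars.isIn ['*'] ['+', '-', '*'] = true from by decide]

theorem pvShunt_atom (em : PySem.Dict String Int) (st) (t : String)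
    (hsp : pvIsSpecial t = false) :
    pvShuntStep em st t = (pvMake em t :: st.1, st.2) := by
  have h1 : t ≠ "(" := by rintro rfl; exact absurd hsp (by decide)
  have h2 : t ≠ ")" := by rintro rfl; exact absurd hsp (by decide)
  unfold pvShuntStep
  rw [if_neg h1, if_neg h2, if_neg (by simp only [Bool.not_eq_true]; simpa using pv_isIn_false hsp)]

theorem pvStep_plus (a b : PySem.Dict (List String) Int) (S) :
    pvStep "+" (b :: a :: S) = pvAdd a b :: S := by simp [pvStep]

theorem pvStep_minus (a b : PySem.Dict (List String) Int) (S) :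
    pvStep "-" (b :: a :: S) = pvSub a b :: S := by simp [pvStep]

theorem pvStep_times (a b : PySem.Dict (List String) Int) (S) :
    pvStep "*" (b :: a :: S) = pvCombine a b :: S := by simp [pvStep]

-- convenient unfolding equations for the fuelled parser (all definitional)
theorem pvParseF_lparen (em : PySem.Dict String Int) (f' : Nat) (rest : List String) :
    pvParseF em (f' + 1) ("(" :: rest) =
      (match pvParseE em f' rest with
       | some (p, r₁) => (match r₁ with | ")" :: r => some (p, r) | _ => none)
       | none => none) := by
  unfold pvParseF; rw [if_pos rfl]

theorem pvParseF_lparen_zero (em : PySem.Dict String Int) (rest : List String) :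
    pvParseF em 0 ("(" :: rest) = none := by
  unfold pvParseF; rw [if_pos rfl]

theorem pvParseF_atom (em : PySem.Dict String Int) (f : Nat) (tok : String) (rest : List String)
    (h1 : ¬ tok = "(") (h2 : ¬ (tok = "+" ∨ tok = "-" ∨ tok = "*" ∨ tok = ")")) :
    pvParseF em f (tok :: rest) = some (pvMake em tok, rest) := by
  unfold pvParseF; rw [if_neg h1, if_neg h2]

theorem pvParseF_op (em : PySem.Dict String Int) (f : Nat) (tok : String) (rest : List String)
    (h1 : ¬ tok = "(") (h2 : tok = "+" ∨ tok = "-" ∨ tok = "*" ∨ tok = ")") :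
    pvParseF em f (tok :: rest) = none := by
  unfold pvParseF; rw [if_neg h1, if_pos h2]

theorem pvParseT_succ (em : PySem.Dict String Int) (f' : Nat) (ts : List String) :
    pvParseT em (f' + 1) ts =
      (match pvParseF em f' ts with
       | some (p, r) => pvParseTLoop em f' p r
       | none => none) := rfl

theorem pvParseTLoop_nil (em : PySem.Dict String Int) (f : Nat) (p : PySem.Dict (List String) Int) :
    pvParseTLoop em f p [] = some (p, []) := by
  unfold pvParseTLoop; rfl

theorem pvParseTLoop_star (em : PySem.Dict String Int) (f' : Nat) (p : PySem.Dict (List String) Int)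
    (rest : List String) :
    pvParseTLoop em (f' + 1) p ("*" :: rest) =
      (match pvParseF em f' rest with
       | some (q, r₁) => pvParseTLoop em f' (pvCombine p q) r₁
       | none => none) := rfl

theorem pvParseTLoop_star_zero (em : PySem.Dict String Int) (p : PySem.Dict (List String) Int)
    (rest : List String) :
    pvParseTLoop em 0 p ("*" :: rest) = none := by
  unfold pvParseTLoop; rw [if_pos rfl]

theorem pvParseTLoop_exit (em : PySem.Dict String Int) (f : Nat) (p : PySem.Dict (List String) Int)
    (tok : String) (rest : List String) (h : ¬ tok = "*") :
    pvParseTLoop em f p (tok :: rest) = some (p, tok :: rest) := by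
  unfold pvParseTLoop; rw [if_neg h]

theorem pvParseE_succ (em : PySem.Dict String Int) (f' : Nat) (ts : List String) :
    pvParseE em (f' + 1) ts =
      (match pvParseT em f' ts with
       | some (p, r) => pvParseELoop em f' p r
       | none => none) := rfl

theorem pvParseELoop_nil (em : PySem.Dict String Int) (f : Nat) (p : PySem.Dict (List String) Int) :
    pvParseELoop em f p [] = some (p, []) := by
  unfold pvParseELoop; rfl

theorem pvParseELoop_pm (em : PySem.Dict String Int) (f' : Nat) (p : PySem.Dict (List String) Int)
    (tok : String) (rest : List String) (h : tok = "+" ∨ tok = "-") :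
    pvParseELoop em (f' + 1) p (tok :: rest) =
      (match pvParseT em f' rest with
       | some (q, r₁) => pvParseELoop em f' (if tok = "+" then pvAdd p q else pvSub p q) r₁
       | none => none) := by
  rcases h with rfl | rfl <;> rfl

theorem pvParseELoop_pm_zero (em : PySem.Dict String Int) (p : PySem.Dict (List String) Int)
    (tok : String) (rest : List String) (h : tok = "+" ∨ tok = "-") :
    pvParseELoop em 0 p (tok :: rest) = none := by
  unfold pvParseELoop; rw [if_pos h]

theorem pvParseELoop_exit (em : PySem.Dict String Int) (f : Nat) (p : PySem.Dict (List String) Int)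
    (tok : String) (rest : List String) (h : ¬ (tok = "+" ∨ tok = "-")) :
    pvParseELoop em f p (tok :: rest) = some (p, tok :: rest) := by
  unfold pvParseELoop; rw [if_neg h]

-- A's loop on the tokens a successful B-parse consumed: the shunting-yard state simulates
-- the recursive-descent results (proved for all five parser functions at once, by strong
-- induction on the fuel).
theorem pvLs (em : PySem.Dict String Int) : ∀ f : Nat,
  (∀ ts p r, pvGood ts → pvParseF em f ts = some (p, r) →
     ∃ xs, ts = xs ++ r ∧ ∀ S O, pvRun em (S, O) xs = (p :: S, O))
  ∧ (∀ ts p r, pvGood ts → pvParseT em f ts = some (p, r) →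
     ∃ xs, ts = xs ++ r ∧ ∀ S O, pvNoStar O →
       ∃ S₂ O₂, pvRun em (S, O) xs = (S₂, O₂) ∧ pvPopWhile "*" S₂ O₂ = (p :: S, O))
  ∧ (∀ r₀ p₀ p r, pvGood r₀ → pvParseTLoop em f p₀ r₀ = some (p, r) →
     ∃ xs, r₀ = xs ++ r ∧ ∀ S O S₂ O₂, pvNoStar O → pvPopWhile "*" S₂ O₂ = (p₀ :: S, O) →
       ∃ S₃ O₃, pvRun em (S₂, O₂) xs = (S₃, O₃) ∧ pvPopWhile "*" S₃ O₃ = (p :: S, O))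
  ∧ (∀ ts p r, pvGood ts → pvParseE em f ts = some (p, r) →
     ∃ xs, ts = xs ++ r ∧ ∀ S O, pvNoOp O →
       ∃ S₂ O₂, pvRun em (S, O) xs = (S₂, O₂) ∧ pvPopWhile "+" S₂ O₂ = (p :: S, O))
  ∧ (∀ r₀ p₀ p r, pvGood r₀ → pvParseELoop em f p₀ r₀ = some (p, r) →
     ∃ xs, r₀ = xs ++ r ∧ ∀ S O S₂ O₂, pvNoOp O → pvPopWhile "+" S₂ O₂ = (p₀ :: S, O) →
       ∃ S₃ O₃, pvRun em (S₂, O₂) xs = (S₃, O₃) ∧ pvPopWhile "+" S₃ O₃ = (p :: S, O)) := by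
  intro f
  induction f using Nat.strong_induction_on with
  | _ f IH =>
  refine ⟨?_, ?_, ?_, ?_, ?_⟩
  · -- parseF
    intro ts p r hg hp
    cases ts with
    | nil => simp [pvParseF] at hp
    | cons tok rest =>
      by_cases h1 : tok = "("
      · subst h1
        cases f with
        | zero => rw [pvParseF_lparen_zero] at hp; cases hp
        | succ f' =>
          obtain ⟨IHF, IHT, IHTL, IHE, IHEL⟩ := IH f' (Nat.lt_succ_self _)
          rw [pvParseF_lparen] at hp
          split at hp
          case h_2 => simp at hp
          case h_1 q r₁ hee =>
            split at hp
            case h_2 => simp at hp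
            case h_1 r2 =>
              rw [Option.some.injEq, Prod.mk.injEq] at hp
              obtain ⟨rfl, rfl⟩ := hp
              have hgrest : pvGood rest := (pvGood_append (xs := ["("]) hg).2
              obtain ⟨xs₁, hsplit, hrun⟩ := IHE rest q (")" :: r2) hgrest hee
              refine ⟨"(" :: xs₁ ++ [")"], by simp [hsplit], ?_⟩
              intro S O
              obtain ⟨S₂, O₂, hr1, hpop⟩ := hrun S ("(" :: O) rfl
              rw [List.cons_append, pvRun_cons, pvShunt_lparen, pvRun_append, hr1,
                pvRun_cons, pvShunt_rparen, pvRun_nil]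
              exact pvPopPlus_popUntil _ _ _ _ hpop
      · by_cases h2 : tok = "+" ∨ tok = "-" ∨ tok = "*" ∨ tok = ")"
        · rw [pvParseF_op em f tok rest h1 h2] at hp; cases hp
        · rw [pvParseF_atom em f tok rest h1 h2] at hp
          rw [Option.some.injEq, Prod.mk.injEq] at hp
          obtain ⟨rfl, rfl⟩ := hp
          have hsp : pvIsSpecial tok = false := by
            cases hv : pvIsSpecial tok
            · rfl
            · rcases hg tok (List.mem_cons_self) hv with h | h | h | h | h
              · exact absurd h h1
              · exact absurd (Or.inr (Or.inr (Or.inr h))) h2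
              · exact absurd (Or.inl h) h2
              · exact absurd (Or.inr (Or.inl h)) h2
              · exact absurd (Or.inr (Or.inr (Or.inl h))) h2
          refine ⟨[tok], rfl, ?_⟩
          intro S O
          rw [pvRun_cons, pvShunt_atom em _ _ hsp, pvRun_nil]
  · -- parseT
    intro ts p r hg hp
    cases f with
    | zero => cases hp
    | succ f' =>
      obtain ⟨IHF, IHT, IHTL, IHE, IHEL⟩ := IH f' (Nat.lt_succ_self _)
      rw [pvParseT_succ] at hp
      split at hp
      case h_2 => simp at hp
      case h_1 q r₁ hef =>
        obtain ⟨xs₁, rfl, hrunF⟩ := IHF ts q r₁ hg hef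
        have hgr : pvGood r₁ := (pvGood_append hg).2
        obtain ⟨xs₂, rfl, hrec⟩ := IHTL r₁ q p r hgr hp
        refine ⟨xs₁ ++ xs₂, by rw [List.append_assoc], ?_⟩
        intro S O hns
        obtain ⟨S₃, O₃, hr2, hpop⟩ := hrec S O (q :: S) O hns (pvPopStar_noop hns _)
        exact ⟨S₃, O₃, by rw [pvRun_append, hrunF, hr2], hpop⟩
  · -- parseTLoop
    intro r₀ p₀ p r hg hp
    cases r₀ with
    | nil =>
      rw [pvParseTLoop_nil, Option.some.injEq, Prod.mk.injEq] at hp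
      obtain ⟨rfl, rfl⟩ := hp
      exact ⟨[], rfl, fun S O S₂ O₂ _ hpop => ⟨S₂, O₂, rfl, hpop⟩⟩
    | cons tok rest =>
      by_cases h1 : tok = "*"
      · subst h1
        cases f with
        | zero => rw [pvParseTLoop_star_zero] at hp; cases hp
        | succ f' =>
          obtain ⟨IHF, IHT, IHTL, IHE, IHEL⟩ := IH f' (Nat.lt_succ_self _)
          rw [pvParseTLoop_star] at hp
          split at hp
          case h_2 => simp at hp
          case h_1 q r₁ hef =>
            have hgrest : pvGood rest := (pvGood_append (xs := ["*"]) hg).2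
            obtain ⟨xs₁, rfl, hrunF⟩ := IHF rest q r₁ hgrest hef
            have hgr : pvGood r₁ := (pvGood_append hgrest).2
            obtain ⟨xs₂, rfl, hrec⟩ := IHTL r₁ (pvCombine p₀ q) p r hgr hp
            refine ⟨"*" :: xs₁ ++ xs₂, by simp, ?_⟩
            intro S O S₂ O₂ hns hpop
            have hstep : pvPopWhile "*" (q :: p₀ :: S) ("*" :: O) = (pvCombine p₀ q :: S, O) := by
              rw [pvPopWhile_cons_pos "*" "*" O (q :: p₀ :: S) (by decide), pvStep_times]
              exact pvPopStar_noop hns _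
            obtain ⟨S₃, O₃, hr2, hpop3⟩ := hrec S O (q :: p₀ :: S) ("*" :: O) hns hstep
            refine ⟨S₃, O₃, ?_, hpop3⟩
            rw [List.cons_append, pvRun_cons, pvShunt_op em _ "*" (by tauto), hpop,
              pvRun_append, hrunF, hr2]
      · rw [pvParseTLoop_exit em f p₀ tok rest h1, Option.some.injEq, Prod.mk.injEq] at hp
        obtain ⟨rfl, rfl⟩ := hp
        exact ⟨[], rfl, fun S O S₂ O₂ _ hpop => ⟨S₂, O₂, rfl, hpop⟩⟩
  · -- parseE
    intro ts p r hg hp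
    cases f with
    | zero => cases hp
    | succ f' =>
      obtain ⟨IHF, IHT, IHTL, IHE, IHEL⟩ := IH f' (Nat.lt_succ_self _)
      rw [pvParseE_succ] at hp
      split at hp
      case h_2 => simp at hp
      case h_1 q r₁ het =>
        obtain ⟨xs₁, rfl, hrunT⟩ := IHT ts q r₁ hg het
        have hgr : pvGood r₁ := (pvGood_append hg).2
        obtain ⟨xs₂, rfl, hrec⟩ := IHEL r₁ q p r hgr hp
        refine ⟨xs₁ ++ xs₂, by rw [List.append_assoc], ?_⟩
        intro S O hno
        obtain ⟨S₂, O₂, hr1, hpop1⟩ := hrunT S O (pvNoOp_noStar hno)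
        have hplus : pvPopWhile "+" S₂ O₂ = (q :: S, O) := by
          rw [pvPopStar_popPlus, hpop1]
          exact pvPopPlus_noop hno _
        obtain ⟨S₃, O₃, hr2, hpop3⟩ := hrec S O S₂ O₂ hno hplus
        exact ⟨S₃, O₃, by rw [pvRun_append, hr1, hr2], hpop3⟩
  · -- parseELoop
    intro r₀ p₀ p r hg hp
    cases r₀ with
    | nil =>
      rw [pvParseELoop_nil, Option.some.injEq, Prod.mk.injEq] at hp
      obtain ⟨rfl, rfl⟩ := hp
      exact ⟨[], rfl, fun S O S₂ O₂ _ hpop => ⟨S₂, O₂, rfl, hpop⟩⟩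
    | cons tok rest =>
      by_cases h1 : tok = "+" ∨ tok = "-"
      · cases f with
        | zero => rw [pvParseELoop_pm_zero em p₀ tok rest h1] at hp; cases hp
        | succ f' =>
          obtain ⟨IHF, IHT, IHTL, IHE, IHEL⟩ := IH f' (Nat.lt_succ_self _)
          rw [pvParseELoop_pm em f' p₀ tok rest h1] at hp
          split at hp
          case h_2 => simp at hp
          case h_1 q r₁ het =>
            have hgrest : pvGood rest := (pvGood_append (xs := [tok]) hg).2
            obtain ⟨xs₁, rfl, hrunT⟩ := IHT rest q r₁ hgrest het
            have hgr : pvGood r₁ := (pvGood_append hgrest).2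
            obtain ⟨xs₂, rfl, hrec⟩ :=
              IHEL r₁ (if tok = "+" then pvAdd p₀ q else pvSub p₀ q) p r hgr hp
            refine ⟨tok :: xs₁ ++ xs₂, by simp, ?_⟩
            intro S O S₂ O₂ hno hpop
            obtain ⟨S₄, O₄, hr1, hpop4⟩ := hrunT (p₀ :: S) (tok :: O)
              (by rcases h1 with rfl | rfl; exacts [Or.inr (Or.inl rfl), Or.inr (Or.inr rfl)])
            have hplus : pvPopWhile "+" S₄ O₄ =
                ((if tok = "+" then pvAdd p₀ q else pvSub p₀ q) :: S, O) := by
              rw [pvPopStar_popPlus, hpop4]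
              rcases h1 with rfl | rfl
              · rw [pvPopWhile_cons_pos "+" "+" O (q :: p₀ :: S) (by decide), pvStep_plus,
                  if_pos rfl]
                exact pvPopPlus_noop hno _
              · rw [pvPopWhile_cons_pos "+" "-" O (q :: p₀ :: S) (by decide), pvStep_minus,
                  if_neg (by decide)]
                exact pvPopPlus_noop hno _
            obtain ⟨S₃, O₃, hr2, hpop3⟩ := hrec S O S₄ O₄ hno hplus
            refine ⟨S₃, O₃, ?_, hpop3⟩
            rw [List.cons_append, pvRun_cons, pvShunt_op em _ tok (by tauto),
              pvPopWhile_pm tok h1 _ _, hpop, pvRun_append, hr1, hr2]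
      · rw [pvParseELoop_exit em f p₀ tok rest h1, Option.some.injEq, Prod.mk.injEq] at hp
        obtain ⟨rfl, rfl⟩ := hp
        exact ⟨[], rfl, fun S O S₂ O₂ _ hpop => ⟨S₂, O₂, rfl, hpop⟩⟩

-- on a pvChk-accepted token list the recursive-descent parser succeeds (enough fuel)
theorem pvGs (em : PySem.Dict String Int) : ∀ f : Nat,
  (∀ ts d, 3 * ts.length + 1 ≤ f → pvChk true d ts = true →
     ∃ p r, pvParseF em f ts = some (p, r) ∧ pvChk false d r = true ∧ r.length < ts.length)
  ∧ (∀ ts d, 3 * ts.length + 2 ≤ f → pvChk true d ts = true →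
     ∃ p r, pvParseT em f ts = some (p, r) ∧ pvChk false d r = true ∧ r.length < ts.length ∧ pvHeadNotStar r)
  ∧ (∀ r₀ p₀ d, 3 * r₀.length + 1 ≤ f → pvChk false d r₀ = true →
     ∃ p r, pvParseTLoop em f p₀ r₀ = some (p, r) ∧ pvChk false d r = true ∧ r.length ≤ r₀.length ∧ pvHeadNotStar r)
  ∧ (∀ ts d, 3 * ts.length + 3 ≤ f → pvChk true d ts = true →
     ∃ p r, pvParseE em f ts = some (p, r) ∧ pvChk false d r = true ∧ r.length < ts.length ∧
       (r = [] ∨ ∃ r', r = ")" :: r'))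
  ∧ (∀ r₀ p₀ d, 3 * r₀.length + 1 ≤ f → pvChk false d r₀ = true → pvHeadNotStar r₀ →
     ∃ p r, pvParseELoop em f p₀ r₀ = some (p, r) ∧ pvChk false d r = true ∧ r.length ≤ r₀.length ∧
       (r = [] ∨ ∃ r', r = ")" :: r')) := by
  intro f
  induction f using Nat.strong_induction_on with
  | _ f IH =>
  refine ⟨?_, ?_, ?_, ?_, ?_⟩
  · -- parseF succeeds
    intro ts d hf hc
    cases ts with
    | nil => simp [pvChk] at hc
    | cons t rest =>
      simp only [pvChk] at hc
      by_cases h1 : t = "("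
      · subst h1
        rw [if_pos rfl] at hc
        simp only [List.length_cons] at hf
        obtain ⟨f', rfl⟩ : ∃ f', f = f' + 1 := ⟨f - 1, by omega⟩
        obtain ⟨GF, GT, GTL, GE, GEL⟩ := IH f' (Nat.lt_succ_self _)
        obtain ⟨p, r₁, hpe, hchk, hlen, hshape⟩ := GE rest (d + 1) (by omega) hc
        rcases hshape with rfl | ⟨r', rfl⟩
        · simp [pvChk] at hchk
        · refine ⟨p, r', ?_, ?_, ?_⟩
          · rw [pvParseF_lparen, hpe]; rfl
          · simp [pvChk] at hchk; exact hchk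
          · simp only [List.length_cons] at hlen ⊢; omega
      · rw [if_neg h1] at hc
        by_cases h2 : pvIsSpecial t = true
        · rw [if_pos h2] at hc; cases hc
        · rw [if_neg h2] at hc
          have h2' : ¬ (t = "+" ∨ t = "-" ∨ t = "*" ∨ t = ")") := by
            rintro (rfl | rfl | rfl | rfl) <;> exact h2 (by decide)
          exact ⟨pvMake em t, rest, pvParseF_atom em f t rest h1 h2', hc, by simp⟩
  · -- parseT succeeds
    intro ts d hf hc
    obtain ⟨f', rfl⟩ : ∃ f', f = f' + 1 := ⟨f - 1, by omega⟩
    obtain ⟨GF, GT, GTL, GE, GEL⟩ := IH f' (Nat.lt_succ_self _)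
    obtain ⟨p, r₁, hpf, hchk, hlen⟩ := GF ts d (by omega) hc
    obtain ⟨p2, r, htl, hchk2, hlen2, hns⟩ := GTL r₁ p d (by omega) hchk
    refine ⟨p2, r, ?_, hchk2, by omega, hns⟩
    rw [pvParseT_succ, hpf]; exact htl
  · -- parseTLoop succeeds
    intro r₀ p₀ d hf hc
    cases r₀ with
    | nil => exact ⟨p₀, [], pvParseTLoop_nil em f p₀, hc, le_refl _, trivial⟩
    | cons t rest =>
      by_cases h1 : t = "*"
      · subst h1
        have hc' : pvChk true d rest = true := by simpa [pvChk] using hc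
        simp only [List.length_cons] at hf
        obtain ⟨f', rfl⟩ : ∃ f', f = f' + 1 := ⟨f - 1, by omega⟩
        obtain ⟨GF, GT, GTL, GE, GEL⟩ := IH f' (Nat.lt_succ_self _)
        obtain ⟨q, r₁, hpf, hchk, hlen⟩ := GF rest d (by omega) hc'
        obtain ⟨p2, r, htl, hchk2, hlen2, hns⟩ := GTL r₁ (pvCombine p₀ q) d (by omega) hchk
        refine ⟨p2, r, ?_, hchk2, by simp only [List.length_cons]; omega, hns⟩
        rw [pvParseTLoop_star, hpf]; exact htl
      · exact ⟨p₀, t :: rest, pvParseTLoop_exit em f p₀ t rest h1, hc, le_refl _, h1⟩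
  · -- parseE succeeds
    intro ts d hf hc
    obtain ⟨f', rfl⟩ : ∃ f', f = f' + 1 := ⟨f - 1, by omega⟩
    obtain ⟨GF, GT, GTL, GE, GEL⟩ := IH f' (Nat.lt_succ_self _)
    obtain ⟨q, r₁, hpt, hchk, hlen, hns⟩ := GT ts d (by omega) hc
    obtain ⟨p, r, hel, hchk2, hlen2, hshape⟩ := GEL r₁ q d (by omega) hchk hns
    refine ⟨p, r, ?_, hchk2, by omega, hshape⟩
    rw [pvParseE_succ, hpt]; exact hel
  · -- parseELoop succeeds
    intro r₀ p₀ d hf hc hns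
    cases r₀ with
    | nil => exact ⟨p₀, [], pvParseELoop_nil em f p₀, hc, le_refl _, Or.inl rfl⟩
    | cons t rest =>
      by_cases h1 : t = "+" ∨ t = "-"
      · have hc' : pvChk true d rest = true := by
          rcases h1 with rfl | rfl <;> simpa [pvChk] using hc
        simp only [List.length_cons] at hf
        obtain ⟨f', rfl⟩ : ∃ f', f = f' + 1 := ⟨f - 1, by omega⟩
        obtain ⟨GF, GT, GTL, GE, GEL⟩ := IH f' (Nat.lt_succ_self _)
        obtain ⟨q, r₁, hpt, hchk, hlen, hns1⟩ := GT rest d (by omega) hc'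
        obtain ⟨p2, r, hel, hchk2, hlen2, hshape⟩ :=
          GEL r₁ (if t = "+" then pvAdd p₀ q else pvSub p₀ q) d (by omega) hchk hns1
        refine ⟨p2, r, ?_, hchk2, by simp only [List.length_cons]; omega, hshape⟩
        rw [pvParseELoop_pm em f' p₀ t rest h1, hpt]; exact hel
      · by_cases ht : t = ")"
        · exact ⟨p₀, t :: rest, pvParseELoop_exit em f p₀ t rest h1, hc, le_refl _,
            Or.inr ⟨rest, by rw [ht]⟩⟩
        · exfalso
          have hcond : ¬ (t = "+" ∨ t = "-" ∨ t = "*") := by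
            rintro (h | h | h)
            · exact h1 (Or.inl h)
            · exact h1 (Or.inr h)
            · exact hns h
          simp only [pvChk] at hc
          rw [if_neg hcond, if_neg ht] at hc
          exact Bool.false_ne_true hc

-- ===== VERDICT (by name: the statement is the Claim_ definition above) =====
set_option maxHeartbeats 1000000 in
theorem basicCalculatorIV_spec : Claim_equal_basicCalculatorIV := by
  intro e vars ints _ hpre
  unfold Spec_basicCalculatorIV
  unfold Pre_basicCalculatorIV at hpre
  rw [Bool.and_eq_true] at hpre
  obtain ⟨hchk, -⟩ := hpre
  -- B's parser succeeds and consumes every token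
  obtain ⟨-, -, -, GE, -⟩ := pvGs (pvEvalmap vars ints) (3 * (pvTokens e).length + 3)
  obtain ⟨p, r, hpe, hchk2, -, hshape⟩ := GE (pvTokens e) 0 (le_refl _) hchk
  have hr : r = [] := by
    rcases hshape with rfl | ⟨r', rfl⟩
    · rfl
    · exfalso; simp [pvChk] at hchk2
  subst hr
  -- A's shunting-yard loop computes the same polynomial
  obtain ⟨-, -, -, LE, -⟩ := pvLs (pvEvalmap vars ints) (3 * (pvTokens e).length + 3)
  obtain ⟨xs, hxs, hrun⟩ := LE (pvTokens e) p [] (pvChk_good _ true 0 hchk) hpe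
  rw [List.append_nil] at hxs
  obtain ⟨S₂, O₂, hr1, hpop⟩ := hrun [] [] trivial
  have h' : (pvTokens e).foldl (pvShuntStep (pvEvalmap vars ints)) ([], []) = (S₂, O₂) := by
    rw [← hxs] at hr1; exact hr1
  have h'' : pvDrain S₂ O₂ = [p] := pvPopPlus_drain O₂ S₂ [p] hpop
  have hA : basicCalculatorIV e vars ints = pvFormat p := by
    unfold basicCalculatorIV
    simp [h', h'']
  have hB : basicCalculatorIV_alt e vars ints = pvFormat p := by
    unfold basicCalculatorIV_alt
    simp [hpe]
  rw [hA, hB]
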